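-- pv_equiv track=rewrite | github.com/Timenem/python_selen | quests/quest443.py | string_parse
-- ===== SOURCE A (Python) =====
-- def string_parse(string):
--     res = []
--     result = []
--     if type(string) != str:
--         return 'Please enter a valid string'
--     for i in range(len(string)):
--         if len(result)>1 and string[i] == result[-1] and string[i] == result[-2]:
--             res.append(string[i])
--         elif len(res)>0:
--             result.append(f'[{"".join(res.copy())}]'); res.clear()
--             result.append(string[i])
--         else:
--             result.append(string[i])
--     if len(res)>0:
--         result.append(f'[{"".join(res.copy())}]')
--     return ''.join(result)
-- ===== SOURCE B (Python) =====
-- def string_parse(string):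
--     if type(string) != str:
--         return 'Please enter a valid string'
--     parts = []
--     i, n = 0, len(string)
--     while i < n:
--         j = i + 1
--         while j < n and string[j] == string[i]:
--             j += 1
--         c, L = string[i], j - i
--         parts.append(c * 2 + '[' + c * (L - 2) + ']' if L > 2 else c * L)
--         i = j
--     return ''.join(parts)
-- ===== Notes on version B (the rewrite author's own statement) =====
-- stated objective: simpler
-- what changed: Replaced A's character-by-character state machine with two growing lists (res/result, peeking at the last two entries of result) by a single split of the string into maximal runs of equal characters, each run rendered independently: runs of length at most two verbatim, longer runs as the first two characters followed by the bracketed remainder.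
import Mathlib
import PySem

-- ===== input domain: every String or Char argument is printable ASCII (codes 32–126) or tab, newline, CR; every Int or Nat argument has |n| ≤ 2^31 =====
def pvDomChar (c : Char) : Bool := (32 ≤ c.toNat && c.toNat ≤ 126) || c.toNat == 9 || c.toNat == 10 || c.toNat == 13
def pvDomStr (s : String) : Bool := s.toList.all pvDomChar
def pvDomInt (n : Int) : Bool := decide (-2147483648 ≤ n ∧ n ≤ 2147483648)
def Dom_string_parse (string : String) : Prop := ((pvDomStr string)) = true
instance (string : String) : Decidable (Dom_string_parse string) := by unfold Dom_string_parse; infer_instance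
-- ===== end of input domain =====

-- B replaces A's char-by-char two-list state machine (peeking at result[-1]/result[-2]) by a single
-- split into maximal runs of equal chars followed by an independent rendering of each run; objective: simpler.
-- (A's `type(string) != str` guard is vacuous under the String-typed port and drops out of both ports.)

-- ===== PORT A =====
-- Python strings are modelled as List Char (PySem.Chars): the 1-char string string[i] is [c],
-- ''.join(res) is PySem.Chars.join [] res (exact).  Loop state: (res, result) exactly as in A.
def pvAStep (st : List (List Char) × List (List Char)) (c : Char) :
    List (List Char) × List (List Char) :=
  if st.2.length > 1 ∧ PySem.List.pyGet? st.2 (-1) = some [c] ∧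
      PySem.List.pyGet? st.2 (-2) = some [c] then
    (st.1 ++ [[c]], st.2)
  else if st.1.length > 0 then
    ([], st.2 ++ [['['] ++ PySem.Chars.join [] st.1 ++ [']'], [c]])
  else
    (st.1, st.2 ++ [[c]])

-- A's trailing `if len(res)>0: result.append(...)` followed by `return ''.join(result)`
def pvFin (st : List (List Char) × List (List Char)) : List Char :=
  PySem.Chars.join []
    (if st.1.length > 0 then st.2 ++ [['['] ++ PySem.Chars.join [] st.1 ++ [']']] else st.2)

def string_parse (string : String) : String :=
  String.ofList (pvFin (string.toList.foldl pvAStep ([], [])))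

-- ===== PORT B =====
-- maximal runs of equal chars, left to right (the two nested while loops of Source B)
def pvRuns : List Char → List (Char × Nat)
  | [] => []
  | c :: rest => (c, (rest.takeWhile (· == c)).length + 1) :: pvRuns (rest.dropWhile (· == c))
  termination_by l => l.length
  decreasing_by simp only [List.length_cons]; exact Nat.lt_succ_of_le (List.length_dropWhile_le _ _)

-- c*2 + '[' + c*(L-2) + ']' if L > 2 else c*L
def pvRender (c : Char) (L : Nat) : List Char :=
  if L > 2 then List.replicate 2 c ++ ['['] ++ List.replicate (L - 2) c ++ [']']
  else List.replicate L c

def string_parse_alt (string : String) : String :=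
  String.ofList ((pvRuns string.toList).flatMap (fun p => pvRender p.1 p.2))

-- ===== PRECONDITION & SPEC =====
def Spec_string_parse (string : String) (out : String) : Prop := out = string_parse_alt string
instance (string : String) (out : String) : Decidable (Spec_string_parse string out) := by
  unfold Spec_string_parse; infer_instance

-- ===== CLAIM (what is proved, stated in full; the proofs are below) =====
def Claim_equal_string_parse : Prop :=
  ∀ (string : String), Dom_string_parse string → Spec_string_parse string (string_parse string)

-- ===== LEMMAS AND PROOFS =====

theorem pvJoinE (l : List (List Char)) : PySem.Chars.join [] l = l.flatten := by
  induction l with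
  | nil => rfl
  | cons x xs ih =>
    cases xs with
    | nil => simp [PySem.Chars.join, List.intercalate]
    | cons y ys => simp_all [PySem.Chars.join, List.intercalate, List.intersperse]

theorem pvFlatRep (k : Nat) (c : Char) :
    (List.replicate k [c]).flatten = List.replicate k c := by
  induction k with
  | zero => rfl
  | succ n ih => simp [List.replicate_succ, ih]

theorem pvGetLast1 (l : List (List Char)) (x : List Char) :
    PySem.List.pyGet? (l ++ [x]) (-1) = some x := by
  simp [PySem.List.pyGet?, PySem.List.pyIdx?]

theorem pvGetLast2 (l : List (List Char)) (x y : List Char) :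
    PySem.List.pyGet? (l ++ [x, y]) (-2) = some x := by
  simp [PySem.List.pyGet?, PySem.List.pyIdx?]

def pvAlt (l : List Char) : List Char := (pvRuns l).flatMap (fun p => pvRender p.1 p.2)

theorem pvRuns_cons (c : Char) (rest : List Char) :
    pvRuns (c :: rest) =
      (c, (rest.takeWhile (· == c)).length + 1) :: pvRuns (rest.dropWhile (· == c)) := by
  rw [pvRuns]

theorem pvStep_then (res result : List (List Char)) (c : Char)
    (h1 : result.length > 1) (h2 : PySem.List.pyGet? result (-1) = some [c])
    (h3 : PySem.List.pyGet? result (-2) = some [c]) :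
    pvAStep (res, result) c = (res ++ [[c]], result) := by
  simp [pvAStep, h1, h2, h3]

theorem pvStep_new (result : List (List Char)) (c : Char)
    (hc : ¬(result.length > 1 ∧ PySem.List.pyGet? result (-1) = some [c] ∧
        PySem.List.pyGet? result (-2) = some [c])) :
    pvAStep ([], result) c = ([], result ++ [[c]]) := by
  simp [pvAStep, hc]

theorem pvStep_flush (res result : List (List Char)) (c : Char) (hres : res.length > 0)
    (hc : ¬(result.length > 1 ∧ PySem.List.pyGet? result (-1) = some [c] ∧
        PySem.List.pyGet? result (-2) = some [c])) :
    pvAStep (res, result) c =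
      ([], result ++ [['['] ++ PySem.Chars.join [] res ++ [']'], [c]]) := by
  simp [pvAStep, hc, hres]

-- inside a run, once the last two entries of result are [c],[c], chars pile up in res
theorem pvRun2 (c : Char) : ∀ (t : List Char) (res r2 : List (List Char)),
    (∀ x ∈ t, x = c) →
    t.foldl pvAStep (res, r2 ++ [[c], [c]]) =
      (res ++ List.replicate t.length [c], r2 ++ [[c], [c]]) := by
  intro t
  induction t with
  | nil => intro res r2 _; simp
  | cons x t' ih =>
    intro res r2 hall
    have hx : x = c := hall x (by simp)
    subst hx
    rw [List.foldl_cons,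
      pvStep_then res (r2 ++ [[x], [x]]) x (by simp) (by
        rw [show r2 ++ [[x], [x]] = (r2 ++ [[x]]) ++ [[x]] by simp]
        exact pvGetLast1 _ _) (pvGetLast2 _ _ _),
      ih (res ++ [[x]]) r2 (fun y hy => hall y (by simp [hy]))]
    simp [List.replicate_succ]

theorem pvMain : ∀ (n : Nat) (l : List Char) (result : List (List Char)),
    l.length ≤ n →
    (∀ c, l.head? = some c → PySem.List.pyGet? result (-1) ≠ some [c]) →
    pvFin (l.foldl pvAStep ([], result)) = result.flatten ++ pvAlt l := by
  intro n
  induction n with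
  | zero =>
    intro l result hl _
    have : l = [] := List.eq_nil_of_length_eq_zero (Nat.le_zero.mp hl)
    subst this
    simp [pvFin, pvAlt, pvRuns, pvJoinE]
  | succ n ih =>
    intro l result hl H
    cases l with
    | nil => simp [pvFin, pvAlt, pvRuns, pvJoinE]
    | cons c rest =>
      have hsplit := List.takeWhile_append_dropWhile (p := (· == c)) (l := rest)
      have ht : ∀ x ∈ rest.takeWhile (· == c), x = c := by
        intro x hx
        have := List.mem_takeWhile_imp hx
        simpa using this
      have hrlen : (rest.dropWhile (· == c)).length ≤ n := by
        have h1 := List.length_dropWhile_le (· == c) rest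
        have h2 : rest.length ≤ n := by simpa using hl
        omega
      have hrhead : ∀ d r', rest.dropWhile (· == c) = d :: r' → d ≠ c := by
        intro d r' hdr
        have hne : rest.dropWhile (· == c) ≠ [] := by rw [hdr]; simp
        have hnot := List.head_dropWhile_not (· == c) hne
        have hq : (rest.dropWhile (· == c)).head? = some d := by rw [hdr]; rfl
        have hh : (rest.dropWhile (· == c)).head hne = d := by
          have := List.head?_eq_some_head (l := rest.dropWhile (· == c)) hne
          rw [hq] at this
          exact (Option.some.inj this).symm
        rw [hh] at hnot
        simpa using hnot
      -- step 1: first char of the run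
      have h1 : pvAStep ([], result) c = ([], result ++ [[c]]) := by
        refine pvStep_new result c ?_
        rintro ⟨-, h2, -⟩
        exact H c rfl h2
      rw [List.foldl_cons, h1,
        pvAlt, pvRuns_cons, List.flatMap_cons, ← pvAlt]
      rcases hT : rest.takeWhile (· == c) with _ | ⟨x, t'⟩
      · -- run of length 1
        have hrest : rest.dropWhile (· == c) = rest := by
          rw [hT, List.nil_append] at hsplit; exact hsplit
        have hhyp : ∀ d, (rest.dropWhile (· == c)).head? = some d →
            PySem.List.pyGet? (result ++ [[c]]) (-1) ≠ some [d] := by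
          intro d hd hcon
          rcases hr : rest.dropWhile (· == c) with _ | ⟨d', r'⟩
          · rw [hr] at hd; simp at hd
          · rw [hr] at hd
            simp at hd
            rw [pvGetLast1] at hcon
            have hcd : c = d := by simpa using Option.some.inj hcon
            exact hrhead d' r' hr (hd.trans hcd.symm)
        have hih := ih (rest.dropWhile (· == c)) (result ++ [[c]]) hrlen
          (by rw [hrest] at hhyp ⊢; exact hhyp)
        rw [hrest] at hih
        rw [hih]
        simp only [pvRender]
        rw [hrest]
        simp
      · -- run of length ≥ 2
        have hx : x = c := ht x (by rw [hT]; simp)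
        subst hx
        have ht' : ∀ y ∈ t', y = x := fun y hy => ht y (by rw [hT]; simp [hy])
        have hrest : x :: t' ++ rest.dropWhile (· == x) = rest := by
          rw [hT] at hsplit; exact hsplit
        rw [show rest.foldl pvAStep ([], result ++ [[x]]) =
            (rest.dropWhile (· == x)).foldl pvAStep
              (t'.foldl pvAStep (pvAStep ([], result ++ [[x]]) x)) by
          conv_lhs => rw [← hrest]
          rw [List.cons_append, List.foldl_cons, List.foldl_append]]
        -- step 2: second char of the run
        have h2 : pvAStep ([], result ++ [[x]]) x = ([], result ++ [[x], [x]]) := by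
          rw [pvStep_new]
          · simp
          · rintro ⟨hlen, -, h3⟩
            rcases List.eq_nil_or_concat result with hnil | ⟨l0, z, hz⟩
            · rw [hnil] at hlen; simp at hlen
            · subst hz
              simp only [List.concat_eq_append] at h3 H
              rw [show l0 ++ [z] ++ [[x]] = l0 ++ [z, [x]] by simp, pvGetLast2] at h3
              exact H x rfl (by rw [pvGetLast1, Option.some.inj h3])
        rw [h2, pvRun2 x t' [] result ht', List.nil_append]
        have hbr : ['['] ++ PySem.Chars.join [] (List.replicate t'.length [x]) ++ [']'] =
            ['['] ++ List.replicate t'.length x ++ [']'] := by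
          rw [pvJoinE, pvFlatRep]
        cases t' with
        | nil =>
          -- run of length exactly 2: res stays empty
          simp only [List.length_nil, List.replicate_zero]
          have hhyp : ∀ d, (rest.dropWhile (· == x)).head? = some d →
              PySem.List.pyGet? (result ++ [[x], [x]]) (-1) ≠ some [d] := by
            intro d hd hcon
            rcases hr : rest.dropWhile (· == x) with _ | ⟨d', r'⟩
            · rw [hr] at hd; simp at hd
            · rw [hr] at hd
              simp at hd
              rw [show result ++ [[x], [x]] = (result ++ [[x]]) ++ [[x]] by simp,
                pvGetLast1] at hcon
              have hcd : x = d := by simpa using Option.some.inj hcon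
              exact hrhead d' r' hr (hd.trans hcd.symm)
          rw [ih (rest.dropWhile (· == x)) (result ++ [[x], [x]]) hrlen hhyp]
          simp [pvRender]
        | cons y t'' =>
          -- run of length k + 2 with k = t''.length + 1 ≥ 1: a bracket gets flushed
          rcases hr : rest.dropWhile (· == x) with _ | ⟨d, r'⟩
          · -- end of string: flush happens in the finalizer
            rw [List.foldl_nil]
            unfold pvFin
            rw [if_pos (by simp)]
            rw [pvJoinE, pvJoinE, pvFlatRep]
            simp [pvRender, pvAlt, pvRuns, List.replicate_succ]
          · -- a different char follows: the loop flushes the bracket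
            have hdx : d ≠ x := hrhead d r' hr
            rw [hr] at hrlen
            have hstepA : pvAStep (List.replicate (y :: t'').length [x], result ++ [[x], [x]]) d =
                ([], (result ++ [[x], [x]]) ++
                  [['['] ++ PySem.Chars.join [] (List.replicate (y :: t'').length [x]) ++ [']'],
                    [d]]) := by
              rw [pvStep_flush _ _ _ (by simp)]
              rintro ⟨-, h2', -⟩
              rw [show result ++ [[x], [x]] = (result ++ [[x]]) ++ [[x]] by simp,
                pvGetLast1] at h2'
              exact hdx (by simpa using (Option.some.inj h2').symm)
            have hstepB : pvAStep ([], (result ++ [[x], [x]]) ++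
                  [['['] ++ PySem.Chars.join [] (List.replicate (y :: t'').length [x]) ++ [']']]) d =
                ([], (result ++ [[x], [x]]) ++
                  [['['] ++ PySem.Chars.join [] (List.replicate (y :: t'').length [x]) ++ [']'],
                    [d]]) := by
              refine (pvStep_new _ d ?_).trans (by simp)
              rintro ⟨-, h2', -⟩
              rw [pvGetLast1] at h2'
              have hL := congrArg List.length (Option.some.inj h2')
              rw [hbr] at hL
              simp at hL
            have hchain : (d :: r').foldl pvAStep
                (List.replicate (y :: t'').length [x], result ++ [[x], [x]]) =
                (d :: r').foldl pvAStep
                  ([], (result ++ [[x], [x]]) ++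
                    [['['] ++ PySem.Chars.join [] (List.replicate (y :: t'').length [x]) ++ [']']]) := by
              rw [List.foldl_cons, List.foldl_cons, hstepA, hstepB]
            have hhyp : ∀ e, (d :: r').head? = some e →
                PySem.List.pyGet? ((result ++ [[x], [x]]) ++
                  [['['] ++ PySem.Chars.join [] (List.replicate (y :: t'').length [x]) ++ [']']])
                  (-1) ≠ some [e] := by
              intro e _ hcon
              rw [pvGetLast1] at hcon
              have hL := congrArg List.length (Option.some.inj hcon)
              rw [hbr] at hL
              simp at hL
            rw [hchain, ih (d :: r') _ hrlen hhyp]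
            rw [hbr]
            simp [pvRender, List.replicate_succ]

-- ===== VERDICT (by name: the statement is the Claim_ definition above) =====
theorem string_parse_spec : Claim_equal_string_parse := by
  intro s _
  unfold Spec_string_parse string_parse string_parse_alt
  have h := pvMain s.toList.length s.toList [] le_rfl
    (by intro c _ hc; simp [PySem.List.pyGet?, PySem.List.pyIdx?] at hc)
  rw [h]
  simp [pvAlt]
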